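-- pv_equiv track=rewrite | github.com/tsuru7/algorithm-study | AtCoder/ABC/201-300/ABC250/B.py | solve
-- ===== SOURCE A (Python) =====
-- def solve(n,a,b):
--     smap = []
--     for row_o in range(n):
--         for row_i in range(a):
--             color = 0
--             s = ''
--             for col_o in range(n):
--                 color = ( col_o + row_o ) % 2
--                 if color == 0:
--                     s += '.'*b
--                 else:
--                     s += '#'*b
--             smap.append(s)
--     return smap
-- ===== SOURCE B (Python) =====
-- def solve(n, a, b):
--     if n <= 0 or a <= 0:
--         return []
--     width = n * b
--     even = (('.' * b + '#' * b) * n)[:width]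
--     odd = (('#' * b + '.' * b) * n)[:width]
--     out = []
--     for r in range(n):
--         out += [even if r % 2 == 0 else odd] * a
--     return out
-- ===== Notes on version B (the rewrite author's own statement) =====
-- stated objective: alternative
-- what changed: A builds every one of the n*a output rows by an inner per-column loop that concatenates b-wide blocks; B constructs just the two periodic row strings once, by slicing the repeated block pattern ('.'*b+'#'*b)*n to width n*b, and then only repeats the right one a times per big row.
import Mathlib
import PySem

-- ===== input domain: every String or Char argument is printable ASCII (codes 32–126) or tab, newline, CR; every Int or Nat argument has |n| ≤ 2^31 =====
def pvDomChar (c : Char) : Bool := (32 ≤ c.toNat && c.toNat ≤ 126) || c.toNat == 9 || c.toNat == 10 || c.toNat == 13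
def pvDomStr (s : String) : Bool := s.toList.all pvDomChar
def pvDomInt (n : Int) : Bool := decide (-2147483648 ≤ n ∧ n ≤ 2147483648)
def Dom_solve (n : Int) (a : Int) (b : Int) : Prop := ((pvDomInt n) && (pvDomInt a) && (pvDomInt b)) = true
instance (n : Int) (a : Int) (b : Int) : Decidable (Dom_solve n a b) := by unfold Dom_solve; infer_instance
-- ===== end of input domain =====

-- B builds the two periodic row strings once by slicing a repeated '.'/'#' block pattern and repeats them, instead of A's per-row per-column concatenation (alternative decomposition; B avoids rebuilding each row).

-- ===== PORT A =====
def solve (n : Int) (a : Int) (b : Int) : List String :=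
  (PySem.List.pyRange 0 n 1).foldl (fun smap row_o =>
    (PySem.List.pyRange 0 a 1).foldl (fun smap _row_i =>
      let s : List Char := (PySem.List.pyRange 0 n 1).foldl (fun s col_o =>
        let color := PySem.Int.mod (col_o + row_o) 2
        if color = 0 then s ++ PySem.List.pyRepeat ['.'] b
        else s ++ PySem.List.pyRepeat ['#'] b) []
      smap ++ [String.ofList s]) smap) []

-- ===== PORT B =====
def solve_alt (n : Int) (a : Int) (b : Int) : List String :=
  if n ≤ 0 ∨ a ≤ 0 then [] else
  let width := n * b
  let even := String.ofList (PySem.List.slice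
    (PySem.List.pyRepeat (PySem.List.pyRepeat ['.'] b ++ PySem.List.pyRepeat ['#'] b) n) none (some width))
  let odd := String.ofList (PySem.List.slice
    (PySem.List.pyRepeat (PySem.List.pyRepeat ['#'] b ++ PySem.List.pyRepeat ['.'] b) n) none (some width))
  (PySem.List.pyRange 0 n 1).foldl (fun out r =>
    out ++ PySem.List.pyRepeat [if PySem.Int.mod r 2 = 0 then even else odd] a) []

-- ===== PRECONDITION & SPEC =====
def Spec_solve (n : Int) (a : Int) (b : Int) (out : List String) : Prop := out = solve_alt n a b
instance (n : Int) (a : Int) (b : Int) (out : List String) : Decidable (Spec_solve n a b out) := by unfold Spec_solve; infer_instance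

-- ===== CLAIM (what is proved, stated in full; the proofs are below) =====
def Claim_equal_solve : Prop := ∀ (n : Int) (a : Int) (b : Int), Dom_solve n a b → Spec_solve n a b (solve n a b)

-- ===== LEMMAS AND PROOFS =====
theorem pyRange_zero_toNat (n : Int) :
    PySem.List.pyRange 0 n 1 = (List.range n.toNat).map (fun k : Nat => (k : Int)) := by
  by_cases h : 0 ≤ n
  · obtain ⟨m, rfl⟩ := Int.eq_ofNat_of_zero_le h
    rw [Int.toNat_natCast]
    exact PySem.List.pyRange_zero_natCast m
  · have h1 : ¬ ((0:Int) < n) := by omega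
    have h2 : n.toNat = 0 := by omega
    simp [PySem.List.pyRange, h1, h2]

theorem flatten_replicate_pair {α : Type} (X Y : List α) (q : Nat) :
    (List.replicate q (X ++ Y)).flatten
      = (List.range (2 * q)).flatMap (fun c => if c % 2 = 0 then X else Y) := by
  induction q with
  | zero => simp
  | succ q ih =>
    have h2 : 2 * (q + 1) = 2 + 2 * q := by ring
    rw [h2, List.range_add, List.flatMap_append, List.flatMap_map]
    have hc : ((List.range (2 * q)).flatMap (fun c => if (2 + c) % 2 = 0 then X else Y))
        = (List.range (2 * q)).flatMap (fun c => if c % 2 = 0 then X else Y) := by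
      apply List.flatMap_congr
      intro c _
      have h : (2 + c) % 2 = c % 2 := by omega
      rw [h]
    rw [hc, ← ih, List.replicate_succ, List.flatten_cons]
    congr 1
    show X ++ Y = (List.range 2).flatMap (fun c => if c % 2 = 0 then X else Y)
    simp [List.range_succ]

theorem take_flatMap_double {α : Type} (f : Nat → List α) (m k : Nat)
    (hk : ∀ c, (f c).length = k) :
    ((List.range (2 * m)).flatMap f).take (m * k) = (List.range m).flatMap f := by
  have h2 : 2 * m = m + m := by ring
  rw [h2, List.range_add, List.flatMap_append]
  have hlen : ((List.range m).flatMap f).length = m * k := by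
    simp [List.length_flatMap, hk]
  rw [List.take_left' hlen]

def pvD (b : Int) : List Char := List.replicate b.toNat '.'
def pvH (b : Int) : List Char := List.replicate b.toNat '#'
def pvRow (n b : Int) (j : Nat) : List Char :=
  (List.range n.toNat).flatMap (fun c => if (c + j) % 2 = 0 then pvD b else pvH b)

theorem rowA_eq (n b : Int) (j : Nat) :
    (PySem.List.pyRange 0 n 1).foldl (fun s col_o =>
      let color := PySem.Int.mod (col_o + (j : Int)) 2
      if color = 0 then s ++ PySem.List.pyRepeat ['.'] b
      else s ++ PySem.List.pyRepeat ['#'] b) []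
    = pvRow n b j := by
  rw [PySem.List.foldl_congr_mem _ _
      (fun s col_o => s ++ (if PySem.Int.mod (col_o + (j : Int)) 2 = 0
        then PySem.List.pyRepeat ['.'] b else PySem.List.pyRepeat ['#'] b)) _
      (by intro acc x _; dsimp only; split <;> rfl)]
  rw [PySem.List.foldl_append_eq_flatMap, List.nil_append, pyRange_zero_toNat,
    List.flatMap_map]
  unfold pvRow pvD pvH
  apply List.flatMap_congr
  intro c _
  have hcast : ((c : Int) + (j : Int)) = ((c + j : Nat) : Int) := by push_cast; ring
  have hmod : PySem.Int.mod ((c + j : Nat) : Int) 2 = (((c + j) % 2 : Nat) : Int) := by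
    exact_mod_cast PySem.Int.mod_natCast (c + j) 2
  rw [hcast, hmod, PySem.List.pyRepeat_singleton, PySem.List.pyRepeat_singleton]
  by_cases h : (c + j) % 2 = 0
  · rw [if_pos (by exact_mod_cast h), if_pos h]
  · rw [if_neg (by exact_mod_cast h), if_neg h]

theorem slice_pattern {α : Type} (X Y : List α) (k m : Nat)
    (hX : X.length = k) (hY : Y.length = k) :
    PySem.List.slice ((List.replicate m (X ++ Y)).flatten) none (some ((m * k : Nat) : Int))
      = (List.range m).flatMap (fun c => if c % 2 = 0 then X else Y) := by
  rw [PySem.List.slice_to_natCast, flatten_replicate_pair]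
  exact take_flatMap_double _ m k (by intro c; split <;> simp [hX, hY])

theorem pattern_eq (n b : Int) (hn : 0 ≤ n) (x y : Char) :
    PySem.List.slice (PySem.List.pyRepeat (List.replicate b.toNat x ++ List.replicate b.toNat y) n)
      none (some (n * b))
    = (List.range n.toNat).flatMap
        (fun c => if c % 2 = 0 then List.replicate b.toNat x else List.replicate b.toNat y) := by
  by_cases hb : 0 ≤ b
  · have hw : n * b = ((n.toNat * b.toNat : Nat) : Int) := by
      rw [Int.natCast_mul, Int.toNat_of_nonneg hn, Int.toNat_of_nonneg hb]
    rw [hw, PySem.List.pyRepeat]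
    exact slice_pattern _ _ b.toNat n.toNat (by simp) (by simp)
  · have hb0 : b.toNat = 0 := by omega
    simp [hb0, PySem.List.pyRepeat, PySem.List.slice]

theorem row_even (n b : Int) (j : Nat) (hj : j % 2 = 0) :
    pvRow n b j = (List.range n.toNat).flatMap
      (fun c => if c % 2 = 0 then pvD b else pvH b) := by
  unfold pvRow
  apply List.flatMap_congr
  intro c _
  have h : (c + j) % 2 = c % 2 := by omega
  rw [h]

theorem row_odd (n b : Int) (j : Nat) (hj : j % 2 = 1) :
    pvRow n b j = (List.range n.toNat).flatMap
      (fun c => if c % 2 = 0 then pvH b else pvD b) := by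
  unfold pvRow
  apply List.flatMap_congr
  intro c _
  by_cases hc : c % 2 = 0
  · rw [if_neg (by omega), if_pos hc]
  · rw [if_pos (by omega), if_neg hc]

theorem main_eq (n a b : Int) : solve n a b = solve_alt n a b := by
  unfold solve solve_alt
  by_cases hg : n ≤ 0 ∨ a ≤ 0
  case pos =>
    rw [if_pos hg]
    rcases hg with hn | ha
    · have h0 : n.toNat = 0 := by omega
      rw [pyRange_zero_toNat n, h0]
      rfl
    · have h0 : a.toNat = 0 := by omega
      have hae : PySem.List.pyRange 0 a 1 = [] := by
        rw [pyRange_zero_toNat a, h0]; rfl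
      rw [PySem.List.foldl_congr_mem _ _ (fun smap _ => smap) _
        (by intro acc x _; rw [hae]; rfl)]
      exact PySem.List.foldl_ignore _ _
  rw [if_neg hg]
  rw [PySem.List.foldl_congr_mem _ _
      (fun smap row_o => smap ++ List.replicate a.toNat (String.ofList (pvRow n b row_o.toNat))) _
      (by
        intro acc x hx
        rw [pyRange_zero_toNat] at hx
        obtain ⟨j, hj, rfl⟩ := List.mem_map.mp hx
        dsimp only
        rw [PySem.List.foldl_append_singleton_eq_map (f := fun _ => String.ofList
          ((PySem.List.pyRange 0 n 1).foldl (fun s col_o =>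
            let color := PySem.Int.mod (col_o + (j : Int)) 2
            if color = 0 then s ++ PySem.List.pyRepeat ['.'] b
            else s ++ PySem.List.pyRepeat ['#'] b) []))]
        rw [rowA_eq n b j, Int.toNat_natCast]
        congr 1
        rw [List.map_const', pyRange_zero_toNat a]
        simp)]
  rw [PySem.List.foldl_append_eq_flatMap, List.nil_append, pyRange_zero_toNat n,
    List.flatMap_map]
  simp only [PySem.List.pyRepeat_singleton]
  rw [PySem.List.foldl_append_eq_flatMap, List.nil_append, List.flatMap_map]
  apply List.flatMap_congr
  intro j hj
  have hn : 0 ≤ n := by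
    by_contra h
    have : n.toNat = 0 := by omega
    simp [this] at hj
  have hmodj : PySem.Int.mod ((j : Nat) : Int) 2 = ((j % 2 : Nat) : Int) := by
    exact_mod_cast PySem.Int.mod_natCast j 2
  rw [Int.toNat_natCast]
  by_cases hp : j % 2 = 0
  · rw [if_pos (by rw [hmodj]; exact_mod_cast hp)]
    congr 1
    rw [pattern_eq n b hn '.' '#', row_even n b j hp]
    unfold pvD pvH
    rfl
  · rw [if_neg (by rw [hmodj]; exact_mod_cast hp)]
    congr 1
    rw [pattern_eq n b hn '#' '.', row_odd n b j (by omega)]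
    unfold pvD pvH
    rfl

-- ===== VERDICT (by name: the statement is the Claim_ definition above) =====
theorem solve_spec : Claim_equal_solve := by
  intro n a b _
  unfold Spec_solve
  exact main_eq n a b
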